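-- pv_equiv track=rewrite | github.com/zibingo/mUBQP | MOEAD_Python/Three.py | Matrix_X
-- ===== SOURCE A (Python) =====
-- def Matrix_X(X, q1, q2, q3):
--     sum1, sum2, sum3 = 0, 0, 0
--     n = len(X)  # n*n的矩阵
--     for i in range(n):
--         for j in range(n):
--             sum1 += q1[i][j] * X[i] * X[j]
--             sum2 += q2[i][j] * X[i] * X[j]
--             sum3 += q3[i][j] * X[i] * X[j]
--     return sum1, sum2, sum3
-- ===== SOURCE B (Python) =====
-- def _axpy(y, a, row):
--     # y + a*row, elementwise (lengths: len(y) entries used)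
--     return [u + a * v for u, v in zip(y, row)]
--
--
-- def Matrix_X(X, q1, q2, q3):
--     # GAXPY formulation: accumulate the three vectors y_k = sum_i X[i] * q_k[i]
--     # (skipping zero coefficients), then take the three dot products y_k . X.
--     n = len(X)
--     y1 = [0] * n
--     y2 = [0] * n
--     y3 = [0] * n
--     for i, xi in enumerate(X):
--         if xi != 0:
--             y1 = _axpy(y1, xi, q1[i])
--             y2 = _axpy(y2, xi, q2[i])
--             y3 = _axpy(y3, xi, q3[i])
--     s1 = sum(u * x for u, x in zip(y1, X))
--     s2 = sum(u * x for u, x in zip(y2, X))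
--     s3 = sum(u * x for u, x in zip(y3, X))
--     return s1, s2, s3
-- ===== Notes on version B (the rewrite author's own statement) =====
-- stated objective: alternative
-- what changed: Replaces A's fused scalar accumulation over the full (i,j) index grid by a GAXPY scheme: it maintains three accumulator VECTORS y_k += X[i]*q_k[i] (skipping rows whose coefficient X[i] is zero) and finishes with three dot products y_k . X.
import Mathlib
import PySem

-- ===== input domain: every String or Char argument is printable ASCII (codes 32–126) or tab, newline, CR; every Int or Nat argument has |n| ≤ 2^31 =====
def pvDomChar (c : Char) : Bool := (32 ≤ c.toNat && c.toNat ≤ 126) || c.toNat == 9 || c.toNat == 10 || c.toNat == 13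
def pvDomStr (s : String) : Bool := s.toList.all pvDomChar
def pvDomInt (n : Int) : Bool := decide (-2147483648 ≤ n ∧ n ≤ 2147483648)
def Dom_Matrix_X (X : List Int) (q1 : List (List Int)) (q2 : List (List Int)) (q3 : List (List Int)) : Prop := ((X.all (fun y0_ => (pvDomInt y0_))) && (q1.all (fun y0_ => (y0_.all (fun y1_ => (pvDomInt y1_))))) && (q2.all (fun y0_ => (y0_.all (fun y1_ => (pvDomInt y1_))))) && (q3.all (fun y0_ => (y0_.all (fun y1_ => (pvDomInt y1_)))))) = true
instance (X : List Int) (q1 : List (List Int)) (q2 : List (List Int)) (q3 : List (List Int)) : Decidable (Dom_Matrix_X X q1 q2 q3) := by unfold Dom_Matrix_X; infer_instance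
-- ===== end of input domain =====

-- B replaces A's fused scalar accumulation over the whole (i,j) grid by a GAXPY scheme:
-- it maintains three accumulator VECTORS y_k += X[i]*q_k[i] (skipping zero coefficients
-- X[i]) and finishes with the three dot products y_k . X — an alternative decomposition.

-- ===== PORT A =====
-- q[i][j] / X[j]: default values are reached only outside Pre_ (where Python A raises IndexError)
def pvQ (q : List (List Int)) (i j : Int) : Int :=
  PySem.List.pyGetD (PySem.List.pyGetD q i []) j 0

def pvX (X : List Int) (j : Int) : Int := PySem.List.pyGetD X j 0

def Matrix_X (X : List Int) (q1 : List (List Int)) (q2 : List (List Int)) (q3 : List (List Int)) : Int × Int × Int :=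
  let n : Int := X.length
  (PySem.List.pyRange 0 n 1).foldl (fun s i =>
    (PySem.List.pyRange 0 n 1).foldl (fun s j =>
      (s.1 + pvQ q1 i j * pvX X i * pvX X j,
       s.2.1 + pvQ q2 i j * pvX X i * pvX X j,
       s.2.2 + pvQ q3 i j * pvX X i * pvX X j)) s) (0, 0, 0)

-- ===== PORT B =====
-- _axpy(y, a, row) = [u + a * v for u, v in zip(y, row)]
def pvAxpy (y : List Int) (a : Int) (row : List Int) : List Int :=
  (y.zip row).map (fun p => p.1 + a * p.2)

-- sum(u * x for u, x in zip(y, X))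
def pvDot (y X : List Int) : Int :=
  (y.zip X).foldl (fun acc p => acc + p.1 * p.2) 0

def Matrix_X_alt (X : List Int) (q1 : List (List Int)) (q2 : List (List Int)) (q3 : List (List Int)) : Int × Int × Int :=
  let n := X.length
  let t := (PySem.List.enumerate X 0).foldl (fun s p =>
    if p.2 ≠ 0 then
      (pvAxpy s.1 p.2 (PySem.List.pyGetD q1 p.1 []),
       pvAxpy s.2.1 p.2 (PySem.List.pyGetD q2 p.1 []),
       pvAxpy s.2.2 p.2 (PySem.List.pyGetD q3 p.1 []))
    else s)
    (List.replicate n 0, List.replicate n 0, List.replicate n 0)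
  (pvDot t.1 X, pvDot t.2.1 X, pvDot t.2.2 X)

-- ===== PRECONDITION & SPEC =====
-- Pre_: exactly the inputs where Python A returns normally: each matrix has at least
-- len(X) rows and each of its first len(X) rows has at least len(X) entries
-- (otherwise A raises IndexError).
def Pre_Matrix_X (X : List Int) (q1 : List (List Int)) (q2 : List (List Int)) (q3 : List (List Int)) : Prop :=
  X.length ≤ q1.length ∧ X.length ≤ q2.length ∧ X.length ≤ q3.length ∧
  (∀ r ∈ q1.take X.length, X.length ≤ r.length) ∧
  (∀ r ∈ q2.take X.length, X.length ≤ r.length) ∧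
  (∀ r ∈ q3.take X.length, X.length ≤ r.length)
instance (X : List Int) (q1 : List (List Int)) (q2 : List (List Int)) (q3 : List (List Int)) : Decidable (Pre_Matrix_X X q1 q2 q3) := by unfold Pre_Matrix_X; infer_instance

def pvWitness_Matrix_X : List Int × List (List Int) × List (List Int) × List (List Int) :=
  ([1, 2], [[1, 0], [0, 1]], [[2, 3], [4, 5]], [[0, 1], [1, 0]])

def Spec_Matrix_X (X : List Int) (q1 : List (List Int)) (q2 : List (List Int)) (q3 : List (List Int)) (out : Int × Int × Int) : Prop := out = Matrix_X_alt X q1 q2 q3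
instance (X : List Int) (q1 : List (List Int)) (q2 : List (List Int)) (q3 : List (List Int)) (out : Int × Int × Int) : Decidable (Spec_Matrix_X X q1 q2 q3 out) := by unfold Spec_Matrix_X; infer_instance

-- ===== CLAIM (what is proved, stated in full; the proofs are below) =====
def Claim_equal_Matrix_X : Prop := ∀ (X : List Int) (q1 : List (List Int)) (q2 : List (List Int)) (q3 : List (List Int)), Dom_Matrix_X X q1 q2 q3 → Pre_Matrix_X X q1 q2 q3 → Spec_Matrix_X X q1 q2 q3 (Matrix_X X q1 q2 q3)

-- ===== LEMMAS AND PROOFS =====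

-- map-sum form of a dot product (proof-side normal form for pvDot and the row sums)
def pvDotM (y X : List Int) : Int := ((y.zip X).map (fun p => p.1 * p.2)).sum

theorem pvDot_eq (y X : List Int) : pvDot y X = pvDotM y X := by
  simp [pvDot, pvDotM, PySem.List.foldl_add]

-- an additive fold on a triple decomposes into three sums
theorem pv_foldl_triple {α : Type} (l : List α) (a b c : α → Int) (s : Int × Int × Int) :
    l.foldl (fun s t => (s.1 + a t, s.2.1 + b t, s.2.2 + c t)) s
      = (s.1 + (l.map a).sum, s.2.1 + (l.map b).sum, s.2.2 + (l.map c).sum) := by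
  induction l generalizing s with
  | nil => simp
  | cons h t ih =>
    simp only [List.foldl_cons, List.map_cons, List.sum_cons, ih]
    obtain ⟨x, y, z⟩ := s
    simp only [Prod.mk.injEq]
    refine ⟨by ring, by ring, by ring⟩

-- core: the range-indexed dot product equals the zip dot product
theorem pv_dot_core (row X : List Int) :
    ((List.range X.length).map (fun k => row.getD k 0 * X.getD k 0)).sum
      = ((row.zip X).map (fun p => p.1 * p.2)).sum := by
  induction X generalizing row with
  | nil => simp
  | cons x xs ih =>
    cases row with
    | nil =>
      simp [List.range_succ_eq_map, List.map_map, Function.comp_def]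
    | cons r rs =>
      simp only [List.length_cons, List.range_succ_eq_map, List.map_cons, List.sum_cons,
        List.map_map, List.zip_cons_cons]
      have : ((List.range xs.length).map
          (fun k => (r :: rs).getD (k + 1) 0 * (x :: xs).getD (k + 1) 0)).sum
          = ((rs.zip xs).map (fun p => p.1 * p.2)).sum := by
        simpa using ih rs
      simpa [Function.comp] using congrArg (fun v => r * x + v) this

-- A's inner loop over j equals X[i] times the row dot product
theorem pv_row_eq (q : List (List Int)) (X : List Int) (i : Int) :
    ((PySem.List.pyRange 0 (X.length : Int) 1).map
        (fun j => pvQ q i j * pvX X i * pvX X j)).sum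
      = pvX X i * pvDotM (PySem.List.pyGetD q i []) X := by
  rw [PySem.List.pyRange_zero_natCast, List.map_map]
  have hmap : ((fun j => pvQ q i j * pvX X i * pvX X j) ∘ (fun k : Nat => (k : Int)))
      = fun k : Nat => pvX X i *
        ((PySem.List.pyGetD q i []).getD k 0 * X.getD k 0) := by
    funext k
    simp only [Function.comp, pvQ, pvX, PySem.List.pyGetD_natCast]
    ring
  rw [hmap, List.sum_map_mul_left, pv_dot_core, pvDotM]

theorem pv_length_axpy (y : List Int) (a : Int) (row : List Int) :
    (pvAxpy y a row).length = min y.length row.length := by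
  simp [pvAxpy]

-- axpy then dot = dot plus a * row dot (bit-exact over Int)
theorem pv_axpy_dot (X : List Int) : ∀ (y row : List Int) (a : Int),
    y.length = X.length → X.length ≤ row.length →
    pvDotM (pvAxpy y a row) X = pvDotM y X + a * pvDotM row X := by
  induction X with
  | nil => intro y row a _ _; simp [pvDotM]
  | cons x xs ih =>
    intro y row a hy hr
    cases y with
    | nil => simp at hy
    | cons u ys =>
      cases row with
      | nil => simp at hr
      | cons r rs =>
        simp only [List.length_cons] at hy hr
        have := ih ys rs a (by omega) (by omega)
        simp only [pvAxpy, pvDotM, List.zip_cons_cons, List.map_cons, List.sum_cons] at this ⊢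
        rw [this]; ring

theorem pv_dot_replicate (n : Nat) (X : List Int) : pvDotM (List.replicate n 0) X = 0 := by
  induction n generalizing X with
  | zero => simp [pvDotM]
  | succ m ih =>
    cases X with
    | nil => simp [pvDotM]
    | cons x xs =>
      simp only [List.replicate_succ, pvDotM, List.zip_cons_cons, List.map_cons,
        List.sum_cons] at *
      simpa using ih xs

-- fold invariant for B's GAXPY loop: each accumulated vector's dot with X is the
-- partial sum of the weighted row dot products
theorem pv_fold_inv (X : List Int) (q1 q2 q3 : List (List Int)) :
    ∀ (L : List (Int × Int)),
    (∀ p ∈ L, X.length ≤ (PySem.List.pyGetD q1 p.1 []).length ∧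
              X.length ≤ (PySem.List.pyGetD q2 p.1 []).length ∧
              X.length ≤ (PySem.List.pyGetD q3 p.1 []).length) →
    ∀ (s : List Int × List Int × List Int),
    s.1.length = X.length → s.2.1.length = X.length → s.2.2.length = X.length →
    (let t := L.foldl (fun s p =>
        if p.2 ≠ 0 then
          (pvAxpy s.1 p.2 (PySem.List.pyGetD q1 p.1 []),
           pvAxpy s.2.1 p.2 (PySem.List.pyGetD q2 p.1 []),
           pvAxpy s.2.2 p.2 (PySem.List.pyGetD q3 p.1 []))
        else s) s
     pvDotM t.1 X = pvDotM s.1 X + (L.map (fun p => p.2 * pvDotM (PySem.List.pyGetD q1 p.1 []) X)).sum ∧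
     pvDotM t.2.1 X = pvDotM s.2.1 X + (L.map (fun p => p.2 * pvDotM (PySem.List.pyGetD q2 p.1 []) X)).sum ∧
     pvDotM t.2.2 X = pvDotM s.2.2 X + (L.map (fun p => p.2 * pvDotM (PySem.List.pyGetD q3 p.1 []) X)).sum) := by
  intro L
  induction L with
  | nil => intro _ s _ _ _; simp
  | cons p L' ih =>
    intro hL s h1 h2 h3
    have hp := hL p (by simp)
    have hL' : ∀ q ∈ L', X.length ≤ (PySem.List.pyGetD q1 q.1 []).length ∧
        X.length ≤ (PySem.List.pyGetD q2 q.1 []).length ∧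
        X.length ≤ (PySem.List.pyGetD q3 q.1 []).length := fun q hq => hL q (by simp [hq])
    by_cases hz : p.2 ≠ 0
    · have hrec := ih hL'
        (pvAxpy s.1 p.2 (PySem.List.pyGetD q1 p.1 []),
         pvAxpy s.2.1 p.2 (PySem.List.pyGetD q2 p.1 []),
         pvAxpy s.2.2 p.2 (PySem.List.pyGetD q3 p.1 []))
        (by simp [pv_length_axpy, h1]; omega)
        (by simp [pv_length_axpy, h2]; omega)
        (by simp [pv_length_axpy, h3]; omega)
      simp only [List.foldl_cons, if_pos hz, List.map_cons, List.sum_cons]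
      simp only at hrec
      obtain ⟨e1, e2, e3⟩ := hrec
      refine ⟨?_, ?_, ?_⟩
      · rw [e1, pv_axpy_dot X s.1 _ p.2 h1 hp.1]; ring
      · rw [e2, pv_axpy_dot X s.2.1 _ p.2 h2 hp.2.1]; ring
      · rw [e3, pv_axpy_dot X s.2.2 _ p.2 h3 hp.2.2]; ring
    · have hz0 : p.2 = 0 := by simpa using hz
      have hrec := ih hL' s h1 h2 h3
      simp only [List.foldl_cons, if_neg hz, List.map_cons, List.sum_cons]
      simp only at hrec
      obtain ⟨e1, e2, e3⟩ := hrec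
      refine ⟨by rw [e1, hz0]; ring, by rw [e2, hz0]; ring, by rw [e3, hz0]; ring⟩

-- rows reached through indices below len(X) satisfy the Pre_ length bound
theorem pv_row_len (q : List (List Int)) (X : List Int) (k : Nat)
    (hk : k < X.length) (hq : X.length ≤ q.length)
    (ht : ∀ r ∈ q.take X.length, X.length ≤ r.length) :
    X.length ≤ (PySem.List.pyGetD q (k : Int) []).length := by
  rw [PySem.List.pyGetD_natCast]
  have hkq : k < q.length := by omega
  rw [List.getD_eq_getElem q [] hkq]
  exact ht q[k] (by
    have : (q.take X.length)[k]'(by simp; omega) = q[k] := List.getElem_take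
    rw [← this]; exact List.getElem_mem _)

-- ===== VERDICT (by name: the statement is the Claim_ definition above) =====
theorem Matrix_X_spec : Claim_equal_Matrix_X := by
  intro X q1 q2 q3 _ hpre
  obtain ⟨hq1, hq2, hq3, ht1, ht2, ht3⟩ := hpre
  unfold Spec_Matrix_X Matrix_X Matrix_X_alt
  -- A side: three sums of weighted row dot products
  simp only [pv_foldl_triple]
  -- B side: the fold invariant
  have hL : ∀ p ∈ PySem.List.enumerate X 0,
      X.length ≤ (PySem.List.pyGetD q1 p.1 []).length ∧
      X.length ≤ (PySem.List.pyGetD q2 p.1 []).length ∧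
      X.length ≤ (PySem.List.pyGetD q3 p.1 []).length := by
    intro p hp
    rw [PySem.List.mem_enumerate_iff] at hp
    obtain ⟨k, hk, rfl⟩ := hp
    simp only [zero_add]
    exact ⟨pv_row_len q1 X k hk hq1 ht1, pv_row_len q2 X k hk hq2 ht2,
           pv_row_len q3 X k hk hq3 ht3⟩
  have hinv := pv_fold_inv X q1 q2 q3 (PySem.List.enumerate X 0) hL
    (List.replicate X.length 0, List.replicate X.length 0, List.replicate X.length 0)
    (by simp) (by simp) (by simp)
  simp only at hinv
  obtain ⟨e1, e2, e3⟩ := hinv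
  simp only [Prod.mk.injEq, pvDot_eq, e1, e2, e3, pv_dot_replicate, zero_add]
  rw [PySem.List.enumerate_eq_map_pyRange (d := 0)]
  simp only [List.map_map, Function.comp_def, PySem.List.len_eq]
  refine ⟨?_, ?_, ?_⟩ <;>
  · congr 1
    apply List.map_congr_left
    intro i _
    rw [pv_row_eq]
    rfl
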